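-- pv_equiv track=rewrite | github.com/project-ncl/dependency-analysis | cli-wrap/src/main/resources/cli/pretty.py | getBestSupportStatus
-- ===== SOURCE A (Python) =====
-- def getBestSupportStatus(products):
--     status = "UNKNOWN"
--     for product in products:
--         ps = product["supportStatus"]
--         if (  (status == "UNKNOWN" and ps in {"UNSUPPORTED", "SUPERSEDED", "SUPPORTED"})
--            or (status == "UNSUPPORTED" and ps in {"SUPERSEDED", "SUPPORTED"})
--            or (status == "SUPERSEDED" and ps in {"SUPPORTED"}) ):
--             status = product["supportStatus"]
--     return status
-- ===== SOURCE B (Python) =====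
-- def getBestSupportStatus(products):
--     statuses = {p["supportStatus"] for p in products}
--     for s in ("SUPPORTED", "SUPERSEDED", "UNSUPPORTED"):
--         if s in statuses:
--             return s
--     return "UNKNOWN"
-- ===== Notes on version B (the rewrite author's own statement) =====
-- stated objective: simpler
-- what changed: Instead of a single pass with a running best-status accumulator and chained precedence conditionals, B collects all statuses into a set in one comprehension and then returns the first of the fixed precedence list (SUPPORTED, SUPERSEDED, UNSUPPORTED) present in the set, defaulting to UNKNOWN.
import Mathlib
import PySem

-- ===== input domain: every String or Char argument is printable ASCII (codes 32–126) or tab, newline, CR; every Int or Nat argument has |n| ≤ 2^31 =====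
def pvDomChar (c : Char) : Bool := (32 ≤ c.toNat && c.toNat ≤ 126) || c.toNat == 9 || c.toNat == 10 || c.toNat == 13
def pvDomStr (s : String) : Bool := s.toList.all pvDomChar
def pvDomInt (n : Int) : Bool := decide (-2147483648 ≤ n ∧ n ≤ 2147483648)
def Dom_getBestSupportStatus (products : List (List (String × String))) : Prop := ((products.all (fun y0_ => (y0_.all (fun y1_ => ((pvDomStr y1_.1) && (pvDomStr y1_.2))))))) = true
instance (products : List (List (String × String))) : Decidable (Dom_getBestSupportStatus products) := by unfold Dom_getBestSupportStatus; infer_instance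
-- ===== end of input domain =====

-- B replaces A's running-best accumulator with one set-building pass followed by an early-return precedence scan (objective: simpler).


-- ===== PORT A =====
-- loop body of A; product["supportStatus"] is total under Pre_, "" is never hit inside Pre_
def pvStepA (status : String) (product : List (String × String)) : String :=
  let ps := (product.lookup "supportStatus").getD ""
  if (status == "UNKNOWN" && (ps == "UNSUPPORTED" || ps == "SUPERSEDED" || ps == "SUPPORTED"))
     || (status == "UNSUPPORTED" && (ps == "SUPERSEDED" || ps == "SUPPORTED"))
     || (status == "SUPERSEDED" && (ps == "SUPPORTED"))
  then (product.lookup "supportStatus").getD "" else status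

def getBestSupportStatus (products : List (List (String × String))) : String :=
  products.foldl pvStepA "UNKNOWN"

-- ===== PORT B =====
-- B: build the set of all statuses, then return the first of the precedence tuple present, else "UNKNOWN"
def getBestSupportStatus_alt (products : List (List (String × String))) : String :=
  let statuses : PySem.Set String :=
    PySem.Set.ofList (products.map (fun p => (p.lookup "supportStatus").getD ""))
  if PySem.Set.contains statuses "SUPPORTED" then "SUPPORTED"
  else if PySem.Set.contains statuses "SUPERSEDED" then "SUPERSEDED"
  else if PySem.Set.contains statuses "UNSUPPORTED" then "UNSUPPORTED"
  else "UNKNOWN"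

-- ===== PRECONDITION & SPEC =====
-- Pre_ excludes exactly the inputs where A raises KeyError: a product without the "supportStatus" key.
def Pre_getBestSupportStatus (products : List (List (String × String))) : Prop :=
  ∀ p ∈ products, (p.lookup "supportStatus").isSome
instance (products : List (List (String × String))) : Decidable (Pre_getBestSupportStatus products) := by unfold Pre_getBestSupportStatus; infer_instance
def pvWitness_getBestSupportStatus : (List (List (String × String))) :=
  [[("supportStatus", "SUPPORTED")], [("supportStatus", "FOO")]]

def Spec_getBestSupportStatus (products : List (List (String × String))) (out : String) : Prop := out = getBestSupportStatus_alt products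
instance (products : List (List (String × String))) (out : String) : Decidable (Spec_getBestSupportStatus products out) := by unfold Spec_getBestSupportStatus; infer_instance

-- ===== CLAIM =====
def Claim_equal_getBestSupportStatus : Prop := ∀ (products : List (List (String × String))), Dom_getBestSupportStatus products → Pre_getBestSupportStatus products → Spec_getBestSupportStatus products (getBestSupportStatus products)

-- ===== LEMMAS AND PROOFS =====
-- proof-only helper: the precedence chain over an accumulator and a list of statuses
def pvBest (status : String) (ss : List String) : String :=
  if status = "SUPPORTED" ∨ "SUPPORTED" ∈ ss then "SUPPORTED"
  else if status = "SUPERSEDED" ∨ "SUPERSEDED" ∈ ss then "SUPERSEDED"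
  else if status = "UNSUPPORTED" ∨ "UNSUPPORTED" ∈ ss then "UNSUPPORTED"
  else status

def pvFour (status : String) : Prop :=
  status = "UNKNOWN" ∨ status = "UNSUPPORTED" ∨ status = "SUPERSEDED" ∨ status = "SUPPORTED"

lemma pvStep_four (status : String) (p : List (String × String)) (hs : pvFour status) :
    pvFour (pvStepA status p) := by
  simp only [pvStepA]
  generalize ((p.lookup "supportStatus").getD "" : String) = ps
  split_ifs with h
  · simp only [Bool.or_eq_true, Bool.and_eq_true, beq_iff_eq] at h
    unfold pvFour
    tauto
  · exact hs

lemma pvStep_best (status : String) (p : List (String × String)) (ss : List String)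
    (hs : pvFour status) :
    pvBest (pvStepA status p) ss = pvBest status (((p.lookup "supportStatus").getD "") :: ss) := by
  simp only [pvStepA]
  generalize ((p.lookup "supportStatus").getD "" : String) = ps
  rcases hs with h | h | h | h <;> subst h <;>
  · by_cases h4 : ps = "SUPPORTED"
    · subst h4; simp [pvBest]
    · by_cases h3 : ps = "SUPERSEDED"
      · subst h3; simp [pvBest]
      · by_cases h2 : ps = "UNSUPPORTED"
        · subst h2; simp [pvBest]
        · simp [pvBest, beq_iff_eq, h4, h3, h2, Ne.symm h4, Ne.symm h3, Ne.symm h2,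
                List.mem_cons]

lemma pvBest_nil (status : String) (hs : pvFour status) : pvBest status [] = status := by
  rcases hs with h | h | h | h <;> subst h <;> simp [pvBest]

lemma pvFoldA_char (l : List (List (String × String))) (status : String) (hs : pvFour status) :
    l.foldl pvStepA status = pvBest status (l.map (fun p => (p.lookup "supportStatus").getD "")) := by
  induction l generalizing status with
  | nil => simp [pvBest_nil status hs]
  | cons p t ih =>
    simp only [List.foldl_cons, List.map_cons]
    rw [ih (pvStepA status p) (pvStep_four status p hs), pvStep_best status p _ hs]

-- ===== VERDICT =====
theorem getBestSupportStatus_spec : Claim_equal_getBestSupportStatus := by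
  intro products _ _
  unfold Spec_getBestSupportStatus getBestSupportStatus getBestSupportStatus_alt
  rw [pvFoldA_char products "UNKNOWN" (Or.inl rfl)]
  set ss := products.map (fun p => (p.lookup "supportStatus").getD "") with hss
  by_cases h4 : "SUPPORTED" ∈ ss <;> by_cases h3 : "SUPERSEDED" ∈ ss <;>
    by_cases h2 : "UNSUPPORTED" ∈ ss <;>
    simp [pvBest, PySem.Set.contains, pysem, h4, h3, h2]
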